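-- pv_equiv track=rewrite | github.com/NoDeskAI/meta-learning-plugin | scripts/eval_deskclaw_meta.py | _skill_has_learned_rules
-- ===== SOURCE A (Python) =====
-- def _skill_has_learned_rules(content: str) -> bool:
--     """True if SKILL.md contains actual learned rules (not just bootstrap)."""
--     in_rules_section = False
--     for line in content.splitlines():
--         if line.startswith("# Meta-Learning Rules"):
--             in_rules_section = True
--             continue
--         if in_rules_section:
--             if line.startswith("#"):
--                 break
--             if line.startswith("- "):
--                 return True
--     return False
-- ===== SOURCE B (Python) =====
-- _META = "# Meta-Learning Rules"
--
-- def _skill_has_learned_rules(content: str) -> bool: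
--     """True if SKILL.md contains actual learned rules (not just bootstrap)."""
--     lines = content.splitlines()
--     meta = [i for i, l in enumerate(lines) if l.startswith(_META)]
--     if not meta:
--         return False
--     body = lines[meta[0] + 1:]
--     stops = [j for j, l in enumerate(body) if l.startswith("#") and not l.startswith(_META)]
--     if stops:
--         body = body[:stops[0]]
--     return any(l.startswith("- ") for l in body)
-- ===== Notes on version B (the rewrite author's own statement) =====
-- stated objective: alternative
-- what changed: Replaces the flag-driven single scan (in_rules_section state with continue/break) by a query over computed structure: find the first meta-header index, find the end of its section (first non-meta '#' line), and test the body slice for a bullet with any().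
import Mathlib
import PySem

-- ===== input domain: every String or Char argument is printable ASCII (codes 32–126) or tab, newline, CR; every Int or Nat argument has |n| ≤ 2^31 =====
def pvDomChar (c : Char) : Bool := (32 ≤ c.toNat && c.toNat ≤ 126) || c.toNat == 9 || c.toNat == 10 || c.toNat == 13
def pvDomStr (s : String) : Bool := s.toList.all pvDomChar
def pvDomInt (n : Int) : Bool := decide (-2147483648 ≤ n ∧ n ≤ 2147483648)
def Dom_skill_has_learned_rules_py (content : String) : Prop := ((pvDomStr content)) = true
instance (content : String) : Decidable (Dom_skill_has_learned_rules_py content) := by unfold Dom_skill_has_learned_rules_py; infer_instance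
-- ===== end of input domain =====

-- B replaces A's flag-driven scan (in_rules_section state with continue/break) by computed
-- structure: locate the first meta-header index, slice off the section body up to the first
-- other header, and query that slice for a bullet (objective: alternative decomposition).

-- ===== PORT A =====
-- the for-loop of A with its in_rules_section flag, continue / break / early return
def pvALoop (lines : List String) (inRules : Bool) : Bool :=
  match lines with
  | [] => false
  | line :: rest =>
    if PySem.Str.startswith line "# Meta-Learning Rules" then pvALoop rest true
    else if inRules then
      if PySem.Str.startswith line "#" then false
      else if PySem.Str.startswith line "- " then true
      else pvALoop rest inRules
    else pvALoop rest inRules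

def skill_has_learned_rules_py (content : String) : Bool :=
  pvALoop (PySem.Str.splitlines content) false

-- ===== PORT B =====
def pvMeta (l : String) : Bool := PySem.Str.startswith l "# Meta-Learning Rules"
def pvStop (l : String) : Bool :=
  PySem.Str.startswith l "#" && !PySem.Str.startswith l "# Meta-Learning Rules"
def pvBullet (l : String) : Bool := PySem.Str.startswith l "- "

def skill_has_learned_rules_py_alt (content : String) : Bool :=
  let lines := PySem.Str.splitlines content
  let metas := (PySem.List.enumerate lines).filter (fun p => pvMeta p.2)
  match metas.head? with
  | none => false
  | some m =>
    let body := PySem.List.slice lines (some (m.1 + 1)) none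
    let stops := (PySem.List.enumerate body).filter (fun p => pvStop p.2)
    let body' := match stops.head? with
      | some st => PySem.List.slice body none (some st.1)
      | none => body
    body'.any pvBullet

-- ===== PRECONDITION & SPEC =====
def Spec_skill_has_learned_rules_py (content : String) (out : Bool) : Prop := out = skill_has_learned_rules_py_alt content
instance (content : String) (out : Bool) : Decidable (Spec_skill_has_learned_rules_py content out) := by unfold Spec_skill_has_learned_rules_py; infer_instance

-- ===== CLAIM (what is proved, stated in full; the proofs are below) =====
def Claim_equal_skill_has_learned_rules_py : Prop := ∀ (content : String), Dom_skill_has_learned_rules_py content → Spec_skill_has_learned_rules_py content (skill_has_learned_rules_py content)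

-- ===== LEMMAS AND PROOFS =====

-- one step of A's loop, with the branch structure laid bare
theorem pvALoop_cons (l : String) (rest : List String) (b : Bool) :
    pvALoop (l :: rest) b =
      (if pvMeta l then pvALoop rest true
       else if b then
         (if PySem.Str.startswith l "#" then false
          else if pvBullet l then true
          else pvALoop rest b)
       else pvALoop rest b) := rfl

-- head of an enumerate-filter comprehension = first index satisfying the predicate
theorem pv_head_enum_filter (p : String → Bool) (lines : List String) (s : Int) :
    ((PySem.List.enumerate lines s).filter (fun q => p q.2)).head?
      = (List.findIdx? p lines).map (fun (k : Nat) => (s + (k : Int), lines.getD k "")) := by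
  induction lines generalizing s with
  | nil => simp [PySem.List.enumerate_nil]
  | cons l rest ih =>
    rw [PySem.List.enumerate_cons]
    by_cases hp : p l = true
    · simp [List.findIdx?_cons, hp]
    · rw [List.filter_cons_of_neg (by simpa using hp)]
      rw [ih (s + 1), List.findIdx?_cons]
      simp only [hp]
      cases List.findIdx? p rest with
      | none => simp
      | some k =>
        simp only [Bool.false_eq_true, if_false, Option.map_some, List.getD_cons_succ,
          Option.some.injEq, Prod.mk.injEq]
        exact ⟨by push_cast; ring, trivial⟩

theorem pv_meta_not_bullet {l : String} (h : pvMeta l = true) : pvBullet l = false := by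
  simp only [pvMeta, pvBullet, PySem.Str.startswith_eq] at h ⊢
  rw [PySem.Chars.startswith_iff] at h
  obtain ⟨t, ht⟩ := h
  apply Bool.eq_false_iff.mpr
  intro hb
  rw [PySem.Chars.startswith_iff] at hb
  obtain ⟨t2, ht2⟩ := hb
  rw [← ht2] at ht
  simp at ht

-- the section body of B, expressed over plain lists
def pvBodyAny (rest : List String) : Bool :=
  match List.findIdx? pvStop rest with
  | none => rest.any pvBullet
  | some j => (rest.take j).any pvBullet

theorem pv_alt_eq (content : String) :
    skill_has_learned_rules_py_alt content
      = (match List.findIdx? pvMeta (PySem.Str.splitlines content) with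
         | none => false
         | some k => pvBodyAny ((PySem.Str.splitlines content).drop (k + 1))) := by
  unfold skill_has_learned_rules_py_alt
  simp only [pv_head_enum_filter]
  cases List.findIdx? pvMeta (PySem.Str.splitlines content) with
  | none => rfl
  | some k =>
    simp only [Option.map_some]
    have h1 : ((0 : Int) + (k : Int)) + 1 = ((k + 1 : Nat) : Int) := by push_cast; ring
    rw [h1, PySem.List.slice_from_natCast]
    unfold pvBodyAny
    cases List.findIdx? pvStop ((PySem.Str.splitlines content).drop (k + 1)) with
    | none => rfl
    | some j =>
      simp only [Option.map_some]
      have h2 : ((0 : Int) + (j : Int)) = ((j : Nat) : Int) := by ring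
      rw [h2, PySem.List.slice_to_natCast]

theorem pv_loop_true (rest : List String) : pvALoop rest true = pvBodyAny rest := by
  induction rest with
  | nil => simp [pvALoop, pvBodyAny]
  | cons l rest ih =>
    rw [pvALoop_cons]
    by_cases hm : pvMeta l = true
    · have hstop : pvStop l = false := by unfold pvStop; unfold pvMeta at hm; rw [hm]; simp
      rw [hm, if_pos rfl, ih]
      unfold pvBodyAny
      rw [List.findIdx?_cons, hstop]
      simp only [Bool.false_eq_true, if_false]
      cases List.findIdx? pvStop rest with
      | none => simp [pv_meta_not_bullet hm]
      | some j => simp [pv_meta_not_bullet hm]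
    · simp only [Bool.not_eq_true] at hm
      by_cases hh : PySem.Str.startswith l "#" = true
      · have hstop : pvStop l = true := by unfold pvStop; unfold pvMeta at hm; rw [hh, hm]; rfl
        rw [hm, hh]
        unfold pvBodyAny
        rw [List.findIdx?_cons, hstop]
        simp
      · simp only [Bool.not_eq_true] at hh
        have hstop : pvStop l = false := by unfold pvStop; rw [hh]; rfl
        rw [hm, hh, ih]
        unfold pvBodyAny
        rw [List.findIdx?_cons, hstop]
        simp only [Bool.false_eq_true, if_false]
        by_cases hb : pvBullet l = true
        · cases hj : List.findIdx? pvStop rest <;> simp [hb]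
        · simp only [Bool.not_eq_true] at hb
          cases hj : List.findIdx? pvStop rest <;> simp [hb]

theorem pv_loop_false (lines : List String) :
    pvALoop lines false
      = (match List.findIdx? pvMeta lines with
         | none => false
         | some k => pvBodyAny (lines.drop (k + 1))) := by
  induction lines with
  | nil => simp [pvALoop]
  | cons l rest ih =>
    rw [pvALoop_cons, List.findIdx?_cons]
    by_cases hm : pvMeta l = true
    · rw [hm]
      simpa using pv_loop_true rest
    · simp only [Bool.not_eq_true] at hm
      rw [hm, ih]
      simp only [Bool.false_eq_true, if_false]
      cases List.findIdx? pvMeta rest with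
      | none => rfl
      | some k => simp

-- ===== VERDICT (by name: the statement is the Claim_ definition above) =====
theorem skill_has_learned_rules_py_spec : Claim_equal_skill_has_learned_rules_py := by
  intro content _
  unfold Spec_skill_has_learned_rules_py skill_has_learned_rules_py
  rw [pv_alt_eq, pv_loop_false]
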